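-- pv_equiv track=rewrite | github.com/SoroushVahidi/combinatorial-opt-agent | tools/nlp4lp_downstream_utility.py | _query_subgroup_hints
-- ===== SOURCE A (Python) =====
-- def _query_subgroup_hints(query: str) -> set[str]:
--     """Infer subgroup signals from query."""
--     q = query.lower()
--     hints: set[str] = set()
--     if any(w in q for w in ["budget", "total", "investment", "allocate"]):
--         hints.add("total_budget_per_unit_profit")
--     if any(w in q for w in ["capacity", "demand", "available", "required", "requirement"]):
--         hints.add("capacity_demand")
--     if any(w in q for w in ["minimum", "maximum", "at least", "at most", "no less", "no more"]):
--         hints.add("min_max_bounds")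
--     if any(w in q for w in ["ratio", "percentage", "fraction", "percent", "share"]):
--         hints.add("ratio_fraction")
--     if any(w in q for w in ["fixed", "penalty", "cost"]):
--         hints.add("fixed_cost_penalty")
--     if any(w in q for w in ["hour", "day", "week", "wage", "time"]):
--         hints.add("time_resource")
--     if any(w in q for w in ["number of", "count", "quantity", "each type"]):
--         hints.add("item_count")
--     return hints
-- ===== SOURCE B (Python) =====
-- _HINT_RULES = [
--     ("total_budget_per_unit_profit", ["budget", "total", "investment", "allocate"]),
--     ("capacity_demand", ["capacity", "demand", "available", "required", "requirement"]),
--     ("min_max_bounds", ["minimum", "maximum", "at least", "at most", "no less", "no more"]),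
--     ("ratio_fraction", ["ratio", "percentage", "fraction", "percent", "share"]),
--     ("fixed_cost_penalty", ["fixed", "penalty", "cost"]),
--     ("time_resource", ["hour", "day", "week", "wage", "time"]),
--     ("item_count", ["number of", "count", "quantity", "each type"]),
-- ]
--
-- _ALL_KEYWORDS = [w for _, kws in _HINT_RULES for w in kws]
--
--
-- def _query_subgroup_hints(query: str) -> set[str]:
--     """Infer subgroup signals: one left-to-right scan of the query matching every
--     keyword at each position (naive multi-pattern matching), then project the
--     matched keywords onto their subgroup labels through the rule table."""
--     q = query.lower()
--     found: set[str] = set()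
--     for i in range(len(q) + 1):
--         for w in _ALL_KEYWORDS:
--             if q.startswith(w, i):
--                 found.add(w)
--     hints: set[str] = set()
--     for label, kws in _HINT_RULES:
--         if any(w in found for w in kws):
--             hints.add(label)
--     return hints
-- ===== Notes on version B (the rewrite author's own statement) =====
-- stated objective: alternative
-- what changed: Instead of running a separate keyword-in-query substring search for each keyword group, B makes one left-to-right scan of the lowercased query, testing every keyword for a match starting at each position (naive multi-pattern matching) to collect the set of occurring keywords, and then projects that set onto labels via a rule table.
import Mathlib
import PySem

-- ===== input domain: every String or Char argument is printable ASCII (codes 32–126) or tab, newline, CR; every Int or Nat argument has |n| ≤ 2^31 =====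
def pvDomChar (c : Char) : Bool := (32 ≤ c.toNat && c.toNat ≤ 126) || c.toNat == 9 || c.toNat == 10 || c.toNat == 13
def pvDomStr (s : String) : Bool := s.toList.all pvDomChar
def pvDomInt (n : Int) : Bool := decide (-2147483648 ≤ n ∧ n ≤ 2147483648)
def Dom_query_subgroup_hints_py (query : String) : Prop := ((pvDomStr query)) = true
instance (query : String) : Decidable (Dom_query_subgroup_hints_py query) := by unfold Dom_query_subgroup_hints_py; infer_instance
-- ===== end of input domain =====

-- B replaces A's per-group substring searches by a single positional scan of the query that collects
-- the set of occurring keywords, then maps them to labels through a rule table (alternative algorithm).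


-- ===== PORT A =====
def query_subgroup_hints_py (query : String) : List String :=
  let q := PySem.Str.lower query
  let hints : PySem.Set String := PySem.Set.empty
  let hints := if ["budget", "total", "investment", "allocate"].any (fun w => PySem.Str.isIn w q) then PySem.Set.add hints "total_budget_per_unit_profit" else hints
  let hints := if ["capacity", "demand", "available", "required", "requirement"].any (fun w => PySem.Str.isIn w q) then PySem.Set.add hints "capacity_demand" else hints
  let hints := if ["minimum", "maximum", "at least", "at most", "no less", "no more"].any (fun w => PySem.Str.isIn w q) then PySem.Set.add hints "min_max_bounds" else hints
  let hints := if ["ratio", "percentage", "fraction", "percent", "share"].any (fun w => PySem.Str.isIn w q) then PySem.Set.add hints "ratio_fraction" else hints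
  let hints := if ["fixed", "penalty", "cost"].any (fun w => PySem.Str.isIn w q) then PySem.Set.add hints "fixed_cost_penalty" else hints
  let hints := if ["hour", "day", "week", "wage", "time"].any (fun w => PySem.Str.isIn w q) then PySem.Set.add hints "time_resource" else hints
  let hints := if ["number of", "count", "quantity", "each type"].any (fun w => PySem.Str.isIn w q) then PySem.Set.add hints "item_count" else hints
  hints

-- ===== PORT B =====
-- the rule table _HINT_RULES of Source B
def hintRules : List (String × List String) :=
  [("total_budget_per_unit_profit", ["budget", "total", "investment", "allocate"]),
   ("capacity_demand", ["capacity", "demand", "available", "required", "requirement"]),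
   ("min_max_bounds", ["minimum", "maximum", "at least", "at most", "no less", "no more"]),
   ("ratio_fraction", ["ratio", "percentage", "fraction", "percent", "share"]),
   ("fixed_cost_penalty", ["fixed", "penalty", "cost"]),
   ("time_resource", ["hour", "day", "week", "wage", "time"]),
   ("item_count", ["number of", "count", "quantity", "each type"])]

-- _ALL_KEYWORDS = [w for _, kws in _HINT_RULES for w in kws]
def allKeywords : List String := hintRules.flatMap (fun r => r.2)

-- `q.startswith(w, i)` for 0 ≤ i ≤ len(q) is exactly `startswith (q.drop i) w` on the char list.
def query_subgroup_hints_py_alt (query : String) : List String :=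
  let q := (PySem.Str.lower query).toList
  let found : PySem.Set String :=
    (List.range (q.length + 1)).foldl
      (fun s i => allKeywords.foldl
        (fun s w => if PySem.Chars.startswith (q.drop i) w.toList then PySem.Set.add s w else s) s)
      PySem.Set.empty
  hintRules.foldl
    (fun hints r => if r.2.any (fun w => PySem.Set.contains found w) then PySem.Set.add hints r.1 else hints)
    PySem.Set.empty

-- ===== PRECONDITION & SPEC =====
def Spec_query_subgroup_hints_py (query : String) (out : List String) : Prop := out = query_subgroup_hints_py_alt query
instance (query : String) (out : List String) : Decidable (Spec_query_subgroup_hints_py query out) := by unfold Spec_query_subgroup_hints_py; infer_instance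

-- ===== CLAIM (what is proved, stated in full; the proofs are below) =====
def Claim_equal_query_subgroup_hints_py : Prop := ∀ (query : String), Dom_query_subgroup_hints_py query → Spec_query_subgroup_hints_py query (query_subgroup_hints_py query)

-- ===== LEMMAS AND PROOFS =====

-- membership after a conditional-add fold over a keyword list
theorem mem_foldl_addIf (c : String → Bool) (kws : List String) (s : PySem.Set String) (x : String) :
    x ∈ kws.foldl (fun s w => if c w then PySem.Set.add s w else s) s ↔
      x ∈ s ∨ (x ∈ kws ∧ c x = true) := by
  induction kws generalizing s with
  | nil => simp
  | cons w ws ih =>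
      simp only [List.foldl_cons, ih, List.mem_cons]
      split_ifs with hc
      · simp only [PySem.Set.mem_add]
        constructor
        · rintro (⟨h | rfl⟩ | ⟨h1, h2⟩)
          · exact Or.inl h
          · exact Or.inr ⟨Or.inl rfl, hc⟩
          · exact Or.inr ⟨Or.inr h1, h2⟩
        · rintro (h | ⟨(rfl | h1), h2⟩)
          · exact Or.inl (Or.inl h)
          · exact Or.inl (Or.inr rfl)
          · exact Or.inr ⟨h1, h2⟩
      · constructor
        · rintro (h | ⟨h1, h2⟩)
          · exact Or.inl h
          · exact Or.inr ⟨Or.inr h1, h2⟩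
        · rintro (h | ⟨(rfl | h1), h2⟩)
          · exact Or.inl h
          · exact absurd h2 hc
          · exact Or.inr ⟨h1, h2⟩

-- membership after the full positional scan
theorem mem_scan (q : List Char) (js : List Nat) (s : PySem.Set String) (x : String) :
    x ∈ js.foldl
        (fun s i => allKeywords.foldl
          (fun s w => if PySem.Chars.startswith (q.drop i) w.toList then PySem.Set.add s w else s) s) s ↔
      x ∈ s ∨ (x ∈ allKeywords ∧ ∃ i ∈ js, PySem.Chars.startswith (q.drop i) x.toList = true) := by
  induction js generalizing s with
  | nil => simp
  | cons j js ih =>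
      simp only [List.foldl_cons, ih, mem_foldl_addIf, List.mem_cons]
      constructor
      · rintro ((h | ⟨h1, h2⟩) | ⟨h1, i, hi, h2⟩)
        · exact Or.inl h
        · exact Or.inr ⟨h1, j, Or.inl rfl, h2⟩
        · exact Or.inr ⟨h1, i, Or.inr hi, h2⟩
      · rintro (h | ⟨h1, i, (rfl | hi), h2⟩)
        · exact Or.inl (Or.inl h)
        · exact Or.inl (Or.inr ⟨h1, h2⟩)
        · exact Or.inr ⟨h1, i, hi, h2⟩

-- a keyword matches at some scanned position iff it is a substring
theorem exists_startswith_iff_isIn (q : List Char) (w : String) :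
    (∃ i ∈ List.range (q.length + 1), PySem.Chars.startswith (q.drop i) w.toList = true) ↔
      PySem.Chars.isIn w.toList q = true := by
  rw [← PySem.Chars.exists_prefix_drop_iff_isIn]
  constructor
  · rintro ⟨i, _, h⟩
    exact ⟨i, (PySem.Chars.startswith_iff _ _).mp h⟩
  · rintro ⟨j, h⟩
    by_cases hj : j ≤ q.length
    · exact ⟨j, List.mem_range.mpr (by omega), (PySem.Chars.startswith_iff _ _).mpr h⟩
    · refine ⟨q.length, List.mem_range.mpr (by omega), (PySem.Chars.startswith_iff _ _).mpr ?_⟩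
      rw [List.drop_length]
      rwa [List.drop_eq_nil_of_le (by omega)] at h
  
-- the scanned `found` set answers membership exactly like Python's `w in q`
theorem contains_scan (q : List Char) (w : String) (hw : w ∈ allKeywords) :
    PySem.Set.contains
      ((List.range (q.length + 1)).foldl
        (fun s i => allKeywords.foldl
          (fun s w => if PySem.Chars.startswith (q.drop i) w.toList then PySem.Set.add s w else s) s)
        PySem.Set.empty) w = PySem.Chars.isIn w.toList q := by
  by_cases h : PySem.Chars.isIn w.toList q = true
  · rw [h]
    rw [PySem.Set.contains_iff, mem_scan]
    exact Or.inr ⟨hw, (exists_startswith_iff_isIn q w).mpr h⟩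
  · rw [Bool.not_eq_true] at h
    rw [h, ← Bool.not_eq_true, PySem.Set.contains_iff, mem_scan]
    simp only [PySem.Set.empty, List.not_mem_nil, false_or, not_and]
    intro _
    rw [← Bool.not_eq_true, ← exists_startswith_iff_isIn] at h
    exact h

-- ===== VERDICT (by name: the statement is the Claim_ definition above) =====
theorem query_subgroup_hints_py_spec : Claim_equal_query_subgroup_hints_py := by
  intro query _
  unfold Spec_query_subgroup_hints_py query_subgroup_hints_py query_subgroup_hints_py_alt
  have hc := contains_scan (PySem.Str.lower query).toList
  simp only []
  simp only [hintRules, List.foldl_cons, List.foldl_nil, List.any_cons, List.any_nil]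
  rw [hc "budget" (by decide), hc "total" (by decide), hc "investment" (by decide), hc "allocate" (by decide),
      hc "capacity" (by decide), hc "demand" (by decide), hc "available" (by decide), hc "required" (by decide), hc "requirement" (by decide),
      hc "minimum" (by decide), hc "maximum" (by decide), hc "at least" (by decide), hc "at most" (by decide), hc "no less" (by decide), hc "no more" (by decide),
      hc "ratio" (by decide), hc "percentage" (by decide), hc "fraction" (by decide), hc "percent" (by decide), hc "share" (by decide),
      hc "fixed" (by decide), hc "penalty" (by decide), hc "cost" (by decide),
      hc "hour" (by decide), hc "day" (by decide), hc "week" (by decide), hc "wage" (by decide), hc "time" (by decide),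
      hc "number of" (by decide), hc "count" (by decide), hc "quantity" (by decide), hc "each type" (by decide)]
  simp [PySem.Str.isIn]
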